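-- pv_equiv track=rewrite | github.com/ismaeljda/travel_planner | app_old.py | _determine_activity_type
-- ===== SOURCE A (Python) =====
-- def _determine_activity_type(name, category):
--     """Determine activity type from name and category"""
--     name_lower = name.lower()
--     category_lower = category.lower()
--
--     if any(word in name_lower for word in ['restaurant', 'café', 'bar', 'food']):
--         return 'restaurant'
--     elif any(word in name_lower for word in ['museum', 'gallery', 'art', 'culture']):
--         return 'culture'
--     elif any(word in name_lower for word in ['beach', 'plage', 'sea']):
--         return 'beach'
--     elif any(word in name_lower for word in ['club', 'bar', 'nightlife', 'disco']):
--         return 'nightlife'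
--     elif any(word in name_lower for word in ['park', 'garden', 'nature', 'outdoor']):
--         return 'nature'
--     elif any(word in name_lower for word in ['shop', 'market', 'store']):
--         return 'shopping'
--     else:
--         return 'sights'
-- ===== SOURCE B (Python) =====
-- # B: flat keyword->priority map scanned exhaustively; result = label of the MINIMUM
-- # matched priority (no ordered short-circuit chain). Duplicate 'bar' keeps priority 0.
-- KEYWORD_PRIORITY = {
--     'restaurant': 0, 'café': 0, 'bar': 0, 'food': 0,
--     'museum': 1, 'gallery': 1, 'art': 1, 'culture': 1,
--     'beach': 2, 'plage': 2, 'sea': 2,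
--     'club': 3, 'nightlife': 3, 'disco': 3,
--     'park': 4, 'garden': 4, 'nature': 4, 'outdoor': 4,
--     'shop': 5, 'market': 5, 'store': 5,
-- }
-- LABELS = ['restaurant', 'culture', 'beach', 'nightlife', 'nature', 'shopping', 'sights']
--
-- def _determine_activity_type(name, category):
--     name_lower = name.lower()
--     best = min((p for w, p in KEYWORD_PRIORITY.items() if w in name_lower),
--                default=len(LABELS) - 1)
--     return LABELS[best]
-- ===== Notes on version B (the rewrite author's own statement) =====
-- stated objective: alternative
-- what changed: Instead of an ordered if/elif chain of short-circuiting any() tests, B scans a single flat keyword->priority dict exhaustively, takes the minimum matched priority (default 6) and indexes a label table; the duplicate keyword 'bar' collapses to its highest priority 0, which preserves A's order semantics.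
import Mathlib
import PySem

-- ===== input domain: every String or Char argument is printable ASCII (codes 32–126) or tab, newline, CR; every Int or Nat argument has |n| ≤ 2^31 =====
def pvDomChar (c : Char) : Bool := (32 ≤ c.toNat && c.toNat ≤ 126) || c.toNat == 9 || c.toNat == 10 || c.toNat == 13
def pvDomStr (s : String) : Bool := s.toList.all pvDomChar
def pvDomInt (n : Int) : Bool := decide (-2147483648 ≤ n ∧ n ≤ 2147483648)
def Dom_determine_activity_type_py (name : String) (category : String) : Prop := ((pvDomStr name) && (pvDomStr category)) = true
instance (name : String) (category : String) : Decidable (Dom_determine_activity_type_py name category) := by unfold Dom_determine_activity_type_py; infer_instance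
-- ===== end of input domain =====

-- B replaces A's ordered short-circuit if/elif chain by an exhaustive scan of a flat
-- keyword->priority map taking the minimum matched priority, then indexes a label table.

-- ===== PORT A =====
-- literal port of A's if/elif chain; `any(word in name_lower for word in [...])` is List.any with `in` = PySem.Str.isIn
def determine_activity_type_py (name : String) (category : String) : String :=
  let name_lower := PySem.Str.lower name
  let _category_lower := PySem.Str.lower category
  if (["restaurant", "café", "bar", "food"].any (fun w => PySem.Str.isIn w name_lower)) then "restaurant"
  else if (["museum", "gallery", "art", "culture"].any (fun w => PySem.Str.isIn w name_lower)) then "culture"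
  else if (["beach", "plage", "sea"].any (fun w => PySem.Str.isIn w name_lower)) then "beach"
  else if (["club", "bar", "nightlife", "disco"].any (fun w => PySem.Str.isIn w name_lower)) then "nightlife"
  else if (["park", "garden", "nature", "outdoor"].any (fun w => PySem.Str.isIn w name_lower)) then "nature"
  else if (["shop", "market", "store"].any (fun w => PySem.Str.isIn w name_lower)) then "shopping"
  else "sights"

-- ===== PORT B =====
-- flat keyword -> priority association list (a Python dict in insertion order; 'bar' is stored once, at priority 0)
def pvKeywordPriority : List (String × Nat) :=
  [ ("restaurant", 0), ("café", 0), ("bar", 0), ("food", 0),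
    ("museum", 1), ("gallery", 1), ("art", 1), ("culture", 1),
    ("beach", 2), ("plage", 2), ("sea", 2),
    ("club", 3), ("nightlife", 3), ("disco", 3),
    ("park", 4), ("garden", 4), ("nature", 4), ("outdoor", 4),
    ("shop", 5), ("market", 5), ("store", 5) ]

def pvLabels : List String :=
  ["restaurant", "culture", "beach", "nightlife", "nature", "shopping", "sights"]

-- min over the matching priorities with default = len(LABELS)-1, as a fold over all dict entries
def determine_activity_type_py_alt (name : String) (category : String) : String :=
  let name_lower := PySem.Str.lower name
  let best := pvKeywordPriority.foldl
    (fun acc wp => if PySem.Str.isIn wp.1 name_lower then min acc wp.2 else acc)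
    (pvLabels.length - 1)
  pvLabels.getD best "sights"

-- ===== PRECONDITION & SPEC =====
def Spec_determine_activity_type_py (name : String) (category : String) (out : String) : Prop := out = determine_activity_type_py_alt name category
instance (name : String) (category : String) (out : String) : Decidable (Spec_determine_activity_type_py name category out) := by unfold Spec_determine_activity_type_py; infer_instance

-- ===== CLAIM (what is proved, stated in full; the proofs are below) =====
def Claim_equal_determine_activity_type_py : Prop := ∀ (name : String) (category : String), Dom_determine_activity_type_py name category → Spec_determine_activity_type_py name category (determine_activity_type_py name category)

-- ===== LEMMAS AND PROOFS =====

-- B's fold, abstracted over the start accumulator and entry list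
def pvMatchFold (nl : String) (acc : Nat) (l : List (String × Nat)) : Nat :=
  l.foldl (fun acc wp => if PySem.Str.isIn wp.1 nl then min acc wp.2 else acc) acc

-- folding over one constant-priority group is a single `if any-match then min`
theorem pvMatchFold_seg (nl : String) (p : Nat) (ws : List String)
    (rest : List (String × Nat)) (acc : Nat) :
    pvMatchFold nl acc ((ws.map (fun w => (w, p))) ++ rest)
      = pvMatchFold nl (if ws.any (fun w => PySem.Str.isIn w nl) then min acc p else acc) rest := by
  induction ws generalizing acc with
  | nil => simp
  | cons w ws ih =>
    simp only [List.map_cons, List.cons_append, pvMatchFold, List.foldl_cons] at *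
    rw [ih]
    cases hb : PySem.Str.isIn w nl <;>
      cases ha : ws.any (fun w => PySem.Str.isIn w nl) <;>
        simp only [List.any_cons, hb, ha, Bool.or_true,
          Bool.or_false, reduceIte, Nat.min_assoc, Nat.min_self] <;> simp

theorem pvMatchFold_nil (nl : String) (acc : Nat) : pvMatchFold nl acc [] = acc := rfl

theorem alt_as_segs (name category : String) :
    determine_activity_type_py_alt name category =
      (let nl := PySem.Str.lower name
       pvLabels.getD
        (pvMatchFold nl 6
          ((["restaurant", "café", "bar", "food"].map (fun w => (w, (0:Nat)))) ++
           ((["museum", "gallery", "art", "culture"].map (fun w => (w, 1))) ++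
            ((["beach", "plage", "sea"].map (fun w => (w, 2))) ++
             ((["club", "nightlife", "disco"].map (fun w => (w, 3))) ++
              ((["park", "garden", "nature", "outdoor"].map (fun w => (w, 4))) ++
               ((["shop", "market", "store"].map (fun w => (w, 5))) ++ ([] : List (String × Nat)))))))))
        "sights") := rfl

-- ===== VERDICT (by name: the statement is the Claim_ definition above) =====
theorem determine_activity_type_py_spec : Claim_equal_determine_activity_type_py := by
  intro name category _
  unfold Spec_determine_activity_type_py
  rw [alt_as_segs]
  simp only [determine_activity_type_py, pvMatchFold_seg, pvMatchFold_nil]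
  split_ifs <;> first | decide | simp_all
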